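-- pv_equiv track=rewrite | github.com/zawie/PhyloDL | treeClassifier.py | getDeepestPair
-- ===== SOURCE A (Python) =====
-- branch_stuff = set([":",".","0","1","2","3","4","5","6","7","8","9","e","-"])
--
-- def getDeepestPair(tree,open_threshold=2):
--     open_count = 0
--     coma_count = 0
--     A = ""
--     B = ""
--     for char in tree:
--         if open_count == open_threshold:
--             if char == ",":
--                 coma_count +=1
--             elif char == ")":
--                 break
--             elif char not in branch_stuff:
--                 if coma_count == 0:
--                     A += char
--                 elif coma_count == 1:
--                     B += char
--         elif char == "(":
--             open_count += 1
--     return set((A,B))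
-- ===== SOURCE B (Python) =====
-- branch_stuff = set([":",".","0","1","2","3","4","5","6","7","8","9","e","-"])
--
-- def getDeepestPair(tree, open_threshold=2):
--     # index just after the k-th open paren, for k = 0..number of open parens
--     starts = [0] + [i + 1 for i, c in enumerate(tree) if c == "("]
--     if not (0 <= open_threshold < len(starts)):
--         return set(("", ""))
--     segment = tree[starts[open_threshold]:].partition(")")[0]
--     first, _, rest = segment.partition(",")
--     second = rest.partition(",")[0]
--     clean = lambda s: "".join(c for c in s if c not in branch_stuff)
--     return set((clean(first), clean(second)))
-- ===== Notes on version B (the rewrite author's own statement) =====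
-- stated objective: simpler
-- what changed: Replaces A's single-pass character state machine (open/comma counters with per-character branching) by a direct decomposition: compute the index just after the threshold-th open parenthesis from an enumerate-comprehension of positions, slice from there, cut at the first close parenthesis and split off the first two comma fields with partition, then strip branch-length characters from each.
import Mathlib
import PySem

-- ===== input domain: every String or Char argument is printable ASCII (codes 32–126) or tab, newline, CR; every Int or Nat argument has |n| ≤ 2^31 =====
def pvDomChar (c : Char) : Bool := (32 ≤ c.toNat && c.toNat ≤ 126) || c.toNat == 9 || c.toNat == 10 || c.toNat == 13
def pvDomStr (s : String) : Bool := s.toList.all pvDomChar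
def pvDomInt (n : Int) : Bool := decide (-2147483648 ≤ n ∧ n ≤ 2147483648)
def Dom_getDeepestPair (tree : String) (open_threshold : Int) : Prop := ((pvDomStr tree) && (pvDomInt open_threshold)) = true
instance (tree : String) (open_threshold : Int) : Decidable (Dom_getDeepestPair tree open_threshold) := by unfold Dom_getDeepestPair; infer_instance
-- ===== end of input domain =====

-- B replaces A's one-pass counter state machine by an index/slice decomposition
-- (position after the threshold-th '(', cut at the first ')', split off the first
-- two comma fields); objective: simpler. Same return value; no side effects.

-- shared module-level constant branch_stuff
def branchStuff : PySem.Set Char :=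
  PySem.Set.ofList [':', '.', '0', '1', '2', '3', '4', '5', '6', '7', '8', '9', 'e', '-']

-- ===== PORT A =====
-- the for-loop of A, state (open_count, coma_count, A, B); strings accumulated as List Char
def pvLoopA (open_threshold : Int) : List Char → Int → Int → List Char → List Char →
    List Char × List Char
  | [], _, _, A, B => (A, B)
  | c :: cs, oc, cc, A, B =>
    if oc = open_threshold then
      if c = ',' then pvLoopA open_threshold cs oc (cc + 1) A B
      else if c = ')' then (A, B)
      else if ¬ (PySem.Set.contains branchStuff c) then
        if cc = 0 then pvLoopA open_threshold cs oc cc (A ++ [c]) B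
        else if cc = 1 then pvLoopA open_threshold cs oc cc A (B ++ [c])
        else pvLoopA open_threshold cs oc cc A B
      else pvLoopA open_threshold cs oc cc A B
    else if c = '(' then pvLoopA open_threshold cs (oc + 1) cc A B
    else pvLoopA open_threshold cs oc cc A B

def getDeepestPair (tree : String) (open_threshold : Int) : List String :=
  let p := pvLoopA open_threshold tree.toList 0 0 [] []
  PySem.Set.ofList [String.ofList p.1, String.ofList p.2]

-- ===== PORT B =====
-- ''.join(c for c in s if c not in branch_stuff)
def pvClean (cs : List Char) : List Char :=
  cs.filter (fun c => !(PySem.Set.contains branchStuff c))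

-- s.partition(sep)[0] for a one-char sep is exactly takeWhile (· ≠ sep);
-- s.partition(sep)[2] is (dropWhile (· ≠ sep)).drop 1 ('' when sep is absent). Exact.
def pvPart0 (sep : Char) (cs : List Char) : List Char := cs.takeWhile (fun c => c ≠ sep)
def pvPart2 (sep : Char) (cs : List Char) : List Char := (cs.dropWhile (fun c => c ≠ sep)).drop 1

def getDeepestPair_alt (tree : String) (open_threshold : Int) : List String :=
  let cs := tree.toList
  let starts : List Int :=
    0 :: (PySem.List.enumerate cs).filterMap (fun p => if p.2 = '(' then some (p.1 + 1) else none)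
  if 0 ≤ open_threshold ∧ open_threshold < (starts.length : Int) then
    match PySem.List.pyGet? starts open_threshold with
    | some s =>
      let segment := pvPart0 ')' (PySem.List.slice cs (some s) none)
      let first := pvPart0 ',' segment
      let second := pvPart0 ',' (pvPart2 ',' segment)
      PySem.Set.ofList [String.ofList (pvClean first), String.ofList (pvClean second)]
    | none => PySem.Set.ofList ["", ""]  -- unreachable: the bound check guarantees a hit
  else
    PySem.Set.ofList ["", ""]

-- ===== PRECONDITION & SPEC =====
def Spec_getDeepestPair (tree : String) (open_threshold : Int) (out : List String) : Prop := out = getDeepestPair_alt tree open_threshold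
instance (tree : String) (open_threshold : Int) (out : List String) : Decidable (Spec_getDeepestPair tree open_threshold out) := by unfold Spec_getDeepestPair; infer_instance

-- ===== CLAIM (what is proved, stated in full; the proofs are below) =====
def Claim_equal_getDeepestPair : Prop := ∀ (tree : String) (open_threshold : Int), Dom_getDeepestPair tree open_threshold → Spec_getDeepestPair tree open_threshold (getDeepestPair tree open_threshold)

-- ===== LEMMAS AND PROOFS =====

-- spec-side helpers used only by the proofs
-- the suffix just after the k-th '(' (k ≥ 1), none if there are fewer than k
def pvNthRest : Nat → List Char → Option (List Char)
  | _, [] => none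
  | k, c :: cs => if c = '(' then (if k = 1 then some cs else pvNthRest (k - 1) cs)
                  else pvNthRest k cs

-- relative positions just after each '(' (1-based offsets into cs)
def pvO : List Char → List Int
  | [] => []
  | c :: cs => if c = '(' then 1 :: (pvO cs).map (· + 1) else (pvO cs).map (· + 1)

theorem pvO_pos : ∀ cs, ∀ p ∈ pvO cs, 1 ≤ p := by
  intro cs
  induction cs with
  | nil => intro p hp; simp [pvO] at hp
  | cons c cs ih =>
    intro p hp
    simp only [pvO] at hp
    split at hp
    · rcases List.mem_cons.1 hp with h | h
      · omega
      · rcases List.mem_map.1 h with ⟨q, hq, rfl⟩; have := ih q hq; omega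
    · rcases List.mem_map.1 hp with ⟨q, hq, rfl⟩; have := ih q hq; omega

-- B's enumerate/filterMap comprehension computes pvO shifted by the start offset
theorem pvEnum_eq (cs : List Char) : ∀ (s : Int),
    (PySem.List.enumerate cs s).filterMap
      (fun p => if p.2 = '(' then some (p.1 + 1) else none)
    = (pvO cs).map (· + s) := by
  induction cs with
  | nil => intro s; simp [PySem.List.enumerate_nil, pvO]
  | cons c cs ih =>
    intro s
    rw [PySem.List.enumerate_cons]
    simp only [List.filterMap_cons, pvO]
    by_cases hc : c = '('
    · subst hc
      simp only [if_pos rfl, ih (s + 1), List.map_cons, List.map_map]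
      refine List.cons_eq_cons.mpr ⟨by show s + 1 = 1 + s; omega, ?_⟩
      rw [List.map_map]
      apply List.map_congr_left
      intro p _
      simp only [Function.comp_apply]
      omega
    · simp only [if_neg hc, ih (s + 1)]
      rw [List.map_map]
      apply List.map_congr_left
      intro p _
      simp only [Function.comp_apply]
      omega

-- indexing pvO gives exactly the suffix after the (j+1)-th '('
theorem pvO_drop (cs : List Char) : ∀ (j : Nat),
    ((pvO cs)[j]?).map (fun p => cs.drop p.toNat) = pvNthRest (j + 1) cs := by
  induction cs with
  | nil => intro j; simp [pvO, pvNthRest]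
  | cons c cs ih =>
    intro j
    simp only [pvO, pvNthRest]
    by_cases hc : c = '('
    · simp only [if_pos hc]
      cases j with
      | zero => simp
      | succ j =>
        rw [if_neg (by omega : ¬ j + 1 + 1 = 1)]
        simp only [Nat.add_sub_cancel, List.getElem?_cons_succ, List.getElem?_map]
        rw [← ih j]
        cases h : (pvO cs)[j]? with
        | none => simp
        | some p =>
          have hp : 1 ≤ p := pvO_pos cs p (List.mem_of_getElem? h)
          simp only [Option.map_some]
          congr 1
          have h2 : (p + 1).toNat = p.toNat + 1 := by omega
          rw [h2, List.drop_succ_cons]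
    · simp only [if_neg hc, List.getElem?_map]
      rw [← ih j]
      cases h : (pvO cs)[j]? with
      | none => simp
      | some p =>
        have hp : 1 ≤ p := pvO_pos cs p (List.mem_of_getElem? h)
        simp only [Option.map_some]
        congr 1
        have h2 : (p + 1).toNat = p.toNat + 1 := by omega
        rw [h2, List.drop_succ_cons]

-- region phase, coma_count ≥ 2: everything up to ')' is ignored
theorem pvLoopA_region2 (t : Int) : ∀ cs (cc : Int) A B, 2 ≤ cc →
    pvLoopA t cs t cc A B = (A, B) := by
  intro cs
  induction cs with
  | nil => intro cc A B _; simp [pvLoopA]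
  | cons c cs ih =>
    intro cc A B hcc
    by_cases h1 : c = ','
    · rw [show pvLoopA t (c :: cs) t cc A B = pvLoopA t cs t (cc + 1) A B by
        simp [pvLoopA, h1]]
      exact ih (cc + 1) A B (by omega)
    · by_cases h2 : c = ')'
      · simp [pvLoopA, h1, h2]
      · by_cases h3 : c ∈ branchStuff
        · rw [show pvLoopA t (c :: cs) t cc A B = pvLoopA t cs t cc A B by
            simp [pvLoopA, h1, h2, h3]]
          exact ih cc A B hcc
        · have step : pvLoopA t (c :: cs) t cc A B =
              (if cc = 0 then pvLoopA t cs t cc (A ++ [c]) B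
               else if cc = 1 then pvLoopA t cs t cc A (B ++ [c])
               else pvLoopA t cs t cc A B) := by
            simp [pvLoopA, h1, h2, h3]
          rw [step, if_neg (by omega : ¬ cc = (0:Int)), if_neg (by omega : ¬ cc = (1:Int))]
          exact ih cc A B hcc

-- region phase, coma_count = 1: collecting the second field
theorem pvLoopA_region1 (t : Int) : ∀ cs A B,
    pvLoopA t cs t 1 A B = (A, B ++ pvClean (pvPart0 ',' (pvPart0 ')' cs))) := by
  intro cs
  induction cs with
  | nil => intro A B; simp [pvLoopA, pvPart0, pvClean]
  | cons c cs ih =>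
    intro A B
    by_cases h1 : c = ','
    · subst h1
      rw [show pvLoopA t (',' :: cs) t 1 A B = pvLoopA t cs t 2 A B by
        simp [pvLoopA]]
      rw [pvLoopA_region2 t cs 2 A B (by omega)]
      simp [pvPart0, pvClean]
    · by_cases h2 : c = ')'
      · subst h2
        simp [pvLoopA, pvPart0, pvClean]
      · have hseg : pvPart0 ',' (pvPart0 ')' (c :: cs))
            = c :: pvPart0 ',' (pvPart0 ')' cs) := by
          simp [pvPart0, h1, h2]
        by_cases h3 : c ∈ branchStuff
        · rw [show pvLoopA t (c :: cs) t 1 A B = pvLoopA t cs t 1 A B by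
            simp [pvLoopA, h1, h2, h3]]
          rw [ih]
          simp [hseg, pvClean, h3]
        · rw [show pvLoopA t (c :: cs) t 1 A B = pvLoopA t cs t 1 A (B ++ [c]) by
            simp [pvLoopA, h1, h2, h3]]
          rw [ih]
          simp [hseg, pvClean, h3, List.append_assoc]

-- region phase, coma_count = 0: collecting both fields
theorem pvLoopA_region0 (t : Int) : ∀ cs A B,
    pvLoopA t cs t 0 A B =
      (A ++ pvClean (pvPart0 ',' (pvPart0 ')' cs)),
       B ++ pvClean (pvPart0 ',' (pvPart2 ',' (pvPart0 ')' cs)))) := by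
  intro cs
  induction cs with
  | nil => intro A B; simp [pvLoopA, pvPart0, pvPart2, pvClean]
  | cons c cs ih =>
    intro A B
    by_cases h1 : c = ','
    · subst h1
      rw [show pvLoopA t (',' :: cs) t 0 A B = pvLoopA t cs t 1 A B by
        simp [pvLoopA]]
      rw [pvLoopA_region1 t cs A B]
      simp [pvPart0, pvPart2, pvClean]
    · by_cases h2 : c = ')'
      · subst h2
        simp [pvLoopA, pvPart0, pvPart2, pvClean]
      · have hseg : pvPart0 ')' (c :: cs) = c :: pvPart0 ')' cs := by simp [pvPart0, h2]
        have hfirst : pvPart0 ',' (c :: pvPart0 ')' cs) = c :: pvPart0 ',' (pvPart0 ')' cs) := by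
          simp [pvPart0, h1]
        have hsecond : pvPart2 ',' (c :: pvPart0 ')' cs) = pvPart2 ',' (pvPart0 ')' cs) := by
          simp [pvPart2, h1]
        by_cases h3 : c ∈ branchStuff
        · rw [show pvLoopA t (c :: cs) t 0 A B = pvLoopA t cs t 0 A B by
            simp [pvLoopA, h1, h2, h3]]
          rw [ih]
          simp [hseg, hfirst, hsecond, pvClean, h3]
        · rw [show pvLoopA t (c :: cs) t 0 A B = pvLoopA t cs t 0 (A ++ [c]) B by
            simp [pvLoopA, h1, h2, h3]]
          rw [ih]
          simp [hseg, hfirst, hsecond, pvClean, h3, List.append_assoc]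

-- open_count can never reach a threshold it already exceeds
theorem pvLoopA_over (t : Int) : ∀ cs (oc cc : Int) A B, t < oc →
    pvLoopA t cs oc cc A B = (A, B) := by
  intro cs
  induction cs with
  | nil => intro oc cc A B _; simp [pvLoopA]
  | cons c cs ih =>
    intro oc cc A B h
    simp only [pvLoopA, if_neg (by omega : ¬ oc = t)]
    by_cases hc : c = '('
    · simp only [if_pos hc]; exact ih (oc + 1) cc A B (by omega)
    · simp only [if_neg hc]; exact ih oc cc A B h

-- seek phase: scanning up to the threshold-th '(' then entering the region
theorem pvLoopA_seek (t : Int) : ∀ cs (oc : Int), oc < t →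
    pvLoopA t cs oc 0 [] [] =
      (match pvNthRest (t - oc).toNat cs with
       | some rest => pvLoopA t rest t 0 [] []
       | none => ([], [])) := by
  intro cs
  induction cs with
  | nil => intro oc _; simp [pvLoopA, pvNthRest]
  | cons c cs ih =>
    intro oc h
    by_cases hc : c = '('
    · subst hc
      rw [show pvLoopA t ('(' :: cs) oc 0 [] [] = pvLoopA t cs (oc + 1) 0 [] [] by
        simp only [pvLoopA]
        rw [if_neg (by omega : ¬ oc = t)]
        simp]
      by_cases h1 : oc + 1 = t
      · rw [h1]
        have hk : (t - oc).toNat = 1 := by omega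
        simp [pvNthRest, hk]
      · rw [ih (oc + 1) (by omega)]
        have hk : (t - oc).toNat ≠ 1 := by omega
        have h2 : (t - oc).toNat - 1 = (t - (oc + 1)).toNat := by omega
        simp [pvNthRest, hk, h2]
    · rw [show pvLoopA t (c :: cs) oc 0 [] [] = pvLoopA t cs oc 0 [] [] by
        simp only [pvLoopA]
        rw [if_neg (by omega : ¬ oc = t)]
        simp [hc]]
      rw [ih oc h]
      simp [pvNthRest, hc]

-- the whole equivalence, on arbitrary inputs
theorem pvMain (tree : String) (t : Int) :
    getDeepestPair tree t = getDeepestPair_alt tree t := by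
  unfold getDeepestPair getDeepestPair_alt
  dsimp only
  set cs := tree.toList with hcs
  rw [pvEnum_eq cs 0]
  have hmap : (pvO cs).map (· + 0) = pvO cs := by
    simp
  rw [hmap]
  by_cases hneg : t < 0
  · -- threshold negative: both sides give {""}
    rw [if_neg (by push_cast; omega)]
    rw [pvLoopA_over t cs 0 0 [] [] hneg]
  · -- t = n ≥ 0
    obtain ⟨n, rfl⟩ : ∃ n : Nat, t = (n : Int) := ⟨t.toNat, by omega⟩
    cases n with
    | zero =>
      -- threshold 0: the region is the whole string
      simp only [Nat.cast_zero]
      rw [if_pos (show (0:Int) ≤ 0 ∧ (0:Int) < ((0 :: pvO cs).length : Int) by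
        refine ⟨le_refl 0, ?_⟩
        exact_mod_cast Nat.succ_pos (pvO cs).length)]
      have hget : PySem.List.pyGet? (0 :: pvO cs) (0:Int) = some 0 := by
        have h0 := PySem.List.pyGet?_natCast (0 :: pvO cs) 0
        simpa using h0
      rw [hget]
      dsimp only
      rw [pvLoopA_region0 0 cs [] []]
      rw [PySem.List.slice_from cs (by omega : (0:Int) ≤ 0)]
      simp
    | succ m =>
      rw [pvLoopA_seek ((m + 1 : Nat) : Int) cs 0 (by push_cast; omega)]
      have htn : (((m + 1 : Nat) : Int) - 0).toNat = m + 1 := by omega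
      rw [htn]
      have hdrop := pvO_drop cs m
      cases hrest : pvNthRest (m + 1) cs with
      | none =>
        -- fewer than m+1 '(': both sides give {""}
        rw [hrest] at hdrop
        dsimp only
        have hnone : (pvO cs)[m]? = none := by
          cases h : (pvO cs)[m]? with
          | none => rfl
          | some p => rw [h] at hdrop; simp at hdrop
        have hlen : (pvO cs).length ≤ m := by
          by_contra h
          rw [List.getElem?_eq_getElem (by omega : m < (pvO cs).length)] at hnone
          simp at hnone
        rw [if_neg (show ¬ ((0:Int) ≤ ((m + 1 : Nat) : Int) ∧
            ((m + 1 : Nat) : Int) < ((0 :: pvO cs).length : Int)) by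
          rintro ⟨-, hlt⟩
          have : (m + 1 : Nat) < (0 :: pvO cs).length := by exact_mod_cast hlt
          simp only [List.length_cons] at this
          omega)]
      | some rest =>
        rw [hrest] at hdrop
        obtain ⟨p, hp, hdropeq⟩ : ∃ p, (pvO cs)[m]? = some p ∧ cs.drop p.toNat = rest := by
          cases h : (pvO cs)[m]? with
          | none => rw [h] at hdrop; simp at hdrop
          | some p => rw [h] at hdrop; simp at hdrop; exact ⟨p, rfl, hdrop⟩
        have hppos : 1 ≤ p := pvO_pos cs p (List.mem_of_getElem? hp)
        have hmlt : m < (pvO cs).length := by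
          by_contra h
          rw [List.getElem?_eq_none (by omega)] at hp
          simp at hp
        rw [if_pos (show (0:Int) ≤ ((m + 1 : Nat) : Int) ∧
            ((m + 1 : Nat) : Int) < ((0 :: pvO cs).length : Int) by
          constructor
          · exact_mod_cast Nat.zero_le (m + 1)
          · exact_mod_cast Nat.succ_lt_succ hmlt)]
        rw [PySem.List.pyGet?_natCast (0 :: pvO cs) (m + 1)]
        rw [List.getElem?_cons_succ, hp]
        dsimp only
        rw [PySem.List.slice_from cs (by omega : (0:Int) ≤ p), hdropeq]
        rw [pvLoopA_region0 ((m + 1 : Nat) : Int) rest [] []]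
        simp

-- ===== VERDICT (by name: the statement is the Claim_ definition above) =====
theorem getDeepestPair_spec : Claim_equal_getDeepestPair := by
  intro tree open_threshold _
  exact pvMain tree open_threshold
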